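-- pv_equiv track=rewrite | github.com/l445250779/data-mining | Popularity_Prediction_on_Twitter/popularity_prediction_on_twitter.py | define_dic
-- ===== SOURCE A (Python) =====
-- from collections import defaultdict
-- from collections import defaultdict
-- from collections import defaultdict
--
-- def define_dic(tweets):
--     tweet_dic = defaultdict(list)
--     i = 0
--     start_time = tweets[0]['firstpost_date']
--     end_time = start_time + 3600
--     for tweet in tweets:
--         tweet_time = tweet['firstpost_date']
--         if tweet_time > end_time:
--             gap = (tweet_time - end_time) // 3600 + 1
--             if gap > 1:
--                 for j in range(i + 1, i + gap):
--                     tweet_dic[j] = []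
--                 i += gap
--                 end_time += gap * 3600
--             else:
--                 i += 1
--                 end_time += 3600
--         tweet_dic[i].append(tweet)
--
--     return tweet_dic
-- ===== SOURCE B (Python) =====
-- def define_dic(tweets):
--     # One pass: each tweet's hour bucket is computed in closed form (ceil of the
--     # offset from the first tweet), kept monotone with a running max, and the
--     # empty gap buckets are produced afterwards by a single range comprehension.
--     start = tweets[0]['firstpost_date']
--     cur = 0
--     buckets = {}
--     for tweet in tweets:
--         hour = -((start - tweet['firstpost_date']) // 3600)  # ceil((t - start) / 3600)
--         if hour - 1 > cur:
--             cur = hour - 1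
--         buckets.setdefault(cur, []).append(tweet)
--     return {k: buckets.get(k, []) for k in range(cur + 1)}
-- ===== Notes on version B (the rewrite author's own statement) =====
-- stated objective: simpler
-- what changed: Replaces the stateful end_time/gap jump machinery and eager empty-bucket insertion inside the loop by a per-tweet closed-form ceiling bucket index kept monotone with a running max, with the empty gap buckets filled by one range comprehension at the end.
-- intended difference: On inputs where some tweet's time is an exact multiple of 3600 seconds past the first tweet's time, at least 7200 past it, and at least 3600 past every earlier tweet, A places that tweet one bucket too far (it treats a tweet landing exactly on its own bucket boundary as past it, leaving a spurious empty bucket), while B places it in the bucket its boundary rule (strict '>' keeps a boundary time in the earlier bucket) assigns everywhere else, which is the intended binning. — e.g. on define_dic([[("firstpost_date", 0)], [("firstpost_date", 7200)]]): A returns [(0, [[("firstpost_date", 0)]]), (1, []), (2, [[("firstpost_date", 7200)]])], B returns [(0, [[("firstpost_date", 0)]]), (1, [[("firstpost_date", 7200)]])]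
import Mathlib
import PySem

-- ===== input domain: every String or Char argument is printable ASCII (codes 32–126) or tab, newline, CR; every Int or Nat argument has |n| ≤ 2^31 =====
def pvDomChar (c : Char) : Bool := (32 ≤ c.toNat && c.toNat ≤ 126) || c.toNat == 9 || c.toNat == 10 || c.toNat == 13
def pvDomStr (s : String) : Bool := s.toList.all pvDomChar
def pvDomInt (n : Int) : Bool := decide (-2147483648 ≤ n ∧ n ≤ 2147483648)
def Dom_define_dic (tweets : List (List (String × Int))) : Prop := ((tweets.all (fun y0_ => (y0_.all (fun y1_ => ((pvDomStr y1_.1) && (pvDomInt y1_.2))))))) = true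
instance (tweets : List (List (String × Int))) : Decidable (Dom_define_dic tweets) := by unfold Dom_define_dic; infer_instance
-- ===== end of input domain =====

-- B replaces A's stateful end_time/gap-jump machinery by a closed-form ceiling bucket index
-- kept monotone with a running max, filling the empty gap buckets in one final range pass (objective: simpler).

-- ===== PORT A =====
-- tweet['firstpost_date']: first-match lookup; a missing key is a KeyError, excluded by Pre_ (getD 0 is never the value used on admitted inputs)
def pvFp (tw : List (String × Int)) : Int :=
  ((PySem.Dict.mk tw).get? "firstpost_date").getD 0

def pvStepA (s : Int × Int × PySem.Dict Int (List (List (String × Int)))) (tweet : List (String × Int)) :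
    Int × Int × PySem.Dict Int (List (List (String × Int))) :=
  let tweet_time := pvFp tweet
  let s' :=
    if tweet_time > s.2.1 then
      let gap := PySem.Int.floordiv (tweet_time - s.2.1) 3600 + 1
      if gap > 1 then
        (s.1 + gap, s.2.1 + gap * 3600,
         (PySem.List.pyRange (s.1 + 1) (s.1 + gap) 1).foldl (fun d j => d.insert j []) s.2.2)
      else
        (s.1 + 1, s.2.1 + 3600, s.2.2)
    else s
  -- tweet_dic[i].append(tweet) on a defaultdict(list)
  (s'.1, s'.2.1, s'.2.2.modify s'.1 [] (· ++ [tweet]))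

def define_dic (tweets : List (List (String × Int))) : List (Int × List (List (String × Int))) :=
  match tweets with
  | [] => []   -- tweets[0] raises IndexError; excluded by Pre_
  | first :: _ =>
    let start_time := pvFp first
    (tweets.foldl pvStepA (0, start_time + 3600, PySem.Dict.empty)).2.2.items

-- ===== PORT B =====
def pvStepB (start : Int) (s : Int × PySem.Dict Int (List (List (String × Int)))) (tweet : List (String × Int)) :
    Int × PySem.Dict Int (List (List (String × Int))) :=
  let hour := -(PySem.Int.floordiv (start - pvFp tweet) 3600)   -- ceil((t - start) / 3600)
  let cur := if hour - 1 > s.1 then hour - 1 else s.1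
  -- buckets.setdefault(cur, []).append(tweet)
  (cur, s.2.modify cur [] (· ++ [tweet]))

def define_dic_alt (tweets : List (List (String × Int))) : List (Int × List (List (String × Int))) :=
  match tweets with
  | [] => []   -- tweets[0] raises IndexError; excluded by Pre_
  | first :: _ =>
    let start := pvFp first
    let r := tweets.foldl (pvStepB start) (0, PySem.Dict.empty)
    (PySem.List.pyRange 0 (r.1 + 1) 1).map (fun k => (k, r.2.getD k []))

-- ===== PRECONDITION & SPEC =====
-- Pre_ excludes exactly the inputs where A raises: the empty list (IndexError on tweets[0])
-- and inputs with a tweet lacking the 'firstpost_date' key (KeyError).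
def Pre_define_dic (tweets : List (List (String × Int))) : Prop :=
  tweets ≠ [] ∧ ∀ tw ∈ tweets, ((PySem.Dict.mk tw).get? "firstpost_date").isSome = true
instance (tweets : List (List (String × Int))) : Decidable (Pre_define_dic tweets) := by
  unfold Pre_define_dic; infer_instance
def pvWitness_define_dic : (List (List (String × Int))) := [[("firstpost_date", 0)]]

-- On inputs where some tweet's time is an exact multiple of 3600 past the first tweet's time, at least 7200
-- past it and at least 3600 past every earlier tweet, A puts that tweet one bucket further than its own
-- strict-'>' boundary rule assigns (leaving a spurious empty bucket), while B puts it in the bucket that rule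
-- assigns everywhere else, which is the intended binning.
def D_define_dic (tweets : List (List (String × Int))) : Prop :=
  let ts := tweets.map pvFp
  ∃ i < ts.length, 3600 ∣ (ts.getD i 0 - ts.getD 0 0) ∧ 7200 ≤ ts.getD i 0 - ts.getD 0 0 ∧
    ∀ t ∈ ts.take i, t ≤ ts.getD i 0 - 3600
instance (tweets : List (List (String × Int))) : Decidable (D_define_dic tweets) := by
  unfold D_define_dic; infer_instance

def Spec_define_dic (tweets : List (List (String × Int))) (out : List (Int × List (List (String × Int)))) : Prop :=
  ¬ D_define_dic tweets → out = define_dic_alt tweets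
instance (tweets : List (List (String × Int))) (out : List (Int × List (List (String × Int)))) : Decidable (Spec_define_dic tweets out) := by
  unfold Spec_define_dic; infer_instance

def pvDiffWitness_define_dic : (List (List (String × Int))) := [[("firstpost_date", 0)], [("firstpost_date", 7200)]]
def pvDiffWitnessOut_define_dic :
    (List (Int × List (List (String × Int)))) × (List (Int × List (List (String × Int)))) :=
  ([(0, [[("firstpost_date", 0)]]), (1, []), (2, [[("firstpost_date", 7200)]])],
   [(0, [[("firstpost_date", 0)]]), (1, [[("firstpost_date", 7200)]])])

-- ===== CLAIM (what is proved, stated in full; the proofs are below) =====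
def Claim_unchanged_define_dic : Prop := ∀ (tweets : List (List (String × Int))), Dom_define_dic tweets → Pre_define_dic tweets → Spec_define_dic tweets (define_dic tweets)
def Claim_changed_define_dic : Prop := Dom_define_dic (pvDiffWitness_define_dic) ∧ Pre_define_dic (pvDiffWitness_define_dic) ∧ D_define_dic (pvDiffWitness_define_dic) ∧ define_dic (pvDiffWitness_define_dic) = pvDiffWitnessOut_define_dic.1 ∧ define_dic_alt (pvDiffWitness_define_dic) = pvDiffWitnessOut_define_dic.2 ∧ pvDiffWitnessOut_define_dic.1 ≠ pvDiffWitnessOut_define_dic.2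
def Claim_exact_define_dic : Prop := ∀ (tweets : List (List (String × Int))), Dom_define_dic tweets → Pre_define_dic tweets → D_define_dic tweets → define_dic tweets ≠ define_dic_alt tweets

-- ===== LEMMAS AND PROOFS =====

def pvTrig (t0 : Int) : Int → List Int → Bool
  | _, [] => false
  | mx, t :: ts =>
      ((t - t0) % 3600 == 0 && decide (7200 ≤ t - t0) && decide (mx ≤ t - 3600)) || pvTrig t0 (max mx t) ts

lemma pvTrig_true_exists (t0 : Int) :
    ∀ (rs : List Int) (mx : Int), pvTrig t0 mx rs = true →
    ∃ i < rs.length, 3600 ∣ (rs.getD i 0 - t0) ∧ 7200 ≤ rs.getD i 0 - t0 ∧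
      mx ≤ rs.getD i 0 - 3600 ∧ ∀ t ∈ rs.take i, t ≤ rs.getD i 0 - 3600 := by
  intro rs
  induction rs with
  | nil => intro mx h; simp [pvTrig] at h
  | cons t ts ih =>
    intro mx h
    simp only [pvTrig, Bool.or_eq_true] at h
    rcases h with h | h
    · refine ⟨0, by simp, ?_⟩
      simp only [Bool.and_eq_true, beq_iff_eq, decide_eq_true_eq] at h
      obtain ⟨⟨h1, h2⟩, h3⟩ := h
      simp only [List.getD_cons_zero, List.take_zero]
      exact ⟨Int.dvd_of_emod_eq_zero h1, h2, h3, by simp⟩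
    · obtain ⟨i, hi, hd, h72, hmx, hall⟩ := ih (max mx t) h
      refine ⟨i + 1, by simpa using Nat.succ_lt_succ hi, ?_⟩
      simp only [List.getD_cons_succ, List.take_succ_cons]
      refine ⟨hd, h72, le_trans (le_max_left _ _) hmx, ?_⟩
      intro x hx
      rcases List.mem_cons.mp hx with rfl | hx
      · exact le_trans (le_max_right _ _) hmx
      · exact hall x hx

-- step evaluation lemmas
lemma pv_stepA_no (c e : Int) (dA : PySem.Dict Int (List (List (String × Int)))) (tw : List (String × Int))
    (hle : ¬ pvFp tw > e) :
    pvStepA (c, e, dA) tw = (c, e, dA.modify c [] (· ++ [tw])) := by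
  simp [pvStepA, hle]

lemma pv_stepA_trig (c e : Int) (dA : PySem.Dict Int (List (List (String × Int)))) (tw : List (String × Int))
    (hgt : pvFp tw > e) (g : Int) (hg : PySem.Int.floordiv (pvFp tw - e) 3600 = g) (hg0 : 0 ≤ g) :
    pvStepA (c, e, dA) tw =
      (c + g + 1, e + (g + 1) * 3600,
       ((PySem.List.pyRange (c + 1) (c + g + 1) 1).foldl (fun d j => d.insert j []) dA).modify (c + g + 1) [] (· ++ [tw])) := by
  rcases eq_or_lt_of_le hg0 with h0 | h0
  · obtain rfl : g = 0 := h0.symm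
    have hrange : PySem.List.pyRange (c + 1) (c + 0 + 1) 1 = [] := by
      exact List.eq_nil_iff_forall_not_mem.mpr fun x hx => by have := PySem.List.mem_pyRange_one.mp hx; omega
    simp only [pvStepA, hg]
    rw [if_pos hgt, if_neg (by norm_num), hrange]
    norm_num
  · simp only [pvStepA, hg]
    rw [if_pos hgt, if_pos (by omega)]
    refine Prod.ext (by ring) (Prod.ext (by ring) ?_)
    simp only [show c + (g + 1) = c + g + 1 from by ring]

lemma pv_stepB_eval (t0 c : Int) (dB : PySem.Dict Int (List (List (String × Int)))) (tw : List (String × Int)) :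
    pvStepB t0 (c, dB) tw =
      (if -(PySem.Int.floordiv (t0 - pvFp tw) 3600) - 1 > c then -(PySem.Int.floordiv (t0 - pvFp tw) 3600) - 1 else c,
       dB.modify (if -(PySem.Int.floordiv (t0 - pvFp tw) 3600) - 1 > c then -(PySem.Int.floordiv (t0 - pvFp tw) 3600) - 1 else c) [] (· ++ [tw])) := rfl

lemma pv_keys_eq (c : Int) (dA : PySem.Dict Int (List (List (String × Int))))
    (g : Int → List (List (String × Int)))
    (hI3 : dA.items = (PySem.List.pyRange 0 (c + 1) 1).map (fun k => (k, g k))) :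
    dA.keys = PySem.List.pyRange 0 (c + 1) 1 := by
  show dA.items.map (·.1) = _
  rw [hI3, List.map_map]
  exact List.map_id _

lemma pv_modify_items (c : Int) (dA : PySem.Dict Int (List (List (String × Int))))
    (g : Int → List (List (String × Int))) (tw : List (String × Int)) (hc : 0 ≤ c)
    (hI3 : dA.items = (PySem.List.pyRange 0 (c + 1) 1).map (fun k => (k, g k))) :
    (dA.modify c [] (· ++ [tw])).items
      = (PySem.List.pyRange 0 (c + 1) 1).map (fun k => (k, if k = c then g c ++ [tw] else g k)) := by
  have hkeys := pv_keys_eq c dA g hI3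
  have hnodup : dA.keys.Nodup := by rw [hkeys]; exact PySem.List.nodup_pyRange_one 0 (c + 1)
  have hcmem : c ∈ PySem.List.pyRange 0 (c + 1) 1 := PySem.List.mem_pyRange_one.mpr ⟨hc, by omega⟩
  have hcont : dA.contains c = true := (PySem.Dict.contains_iff_mem_keys dA c).mpr (hkeys ▸ hcmem)
  have hgetD : dA.getD c [] = g c := by
    refine PySem.Dict.getD_of_mem_items dA ?_ hnodup []
    rw [hI3]; exact List.mem_map.mpr ⟨c, hcmem, rfl⟩
  have hmod : dA.modify c [] (· ++ [tw]) = dA.insert c (dA.getD c [] ++ [tw]) := rfl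
  rw [hmod, PySem.Dict.items_insert_of_contains dA _ hcont, hI3, List.map_map, hgetD]
  refine List.map_congr_left fun k hk => ?_
  by_cases hkc : k = c
  · simp [hkc]
  · simp [hkc]

lemma pv_trig_items (c h : Int) (dA dB : PySem.Dict Int (List (List (String × Int))))
    (tw : List (String × Int)) (hc : 0 ≤ c) (hch : c + 2 ≤ h)
    (hI3 : dA.items = (PySem.List.pyRange 0 (c + 1) 1).map (fun k => (k, dB.getD k [])))
    (hI5 : ∀ k : Int, c < k → dB.getD k [] = []) :
    (((PySem.List.pyRange (c + 1) (h - 1) 1).foldl (fun d j => d.insert j []) dA).modify (h - 1) [] (· ++ [tw])).items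
      = (PySem.List.pyRange 0 ((h - 1) + 1) 1).map (fun k => (k, (dB.modify (h - 1) [] (· ++ [tw])).getD k [])) := by
  have hkeys := pv_keys_eq c dA (fun k => dB.getD k []) hI3
  have hfresh : ∀ j ∈ PySem.List.pyRange (c + 1) (h - 1) 1, dA.contains j = false := by
    intro j hj
    have hj' := PySem.List.mem_pyRange_one.mp hj
    rw [PySem.Dict.contains_eq_decide_mem_keys, hkeys]
    simp only [PySem.List.mem_pyRange_one, decide_eq_false_iff_not]
    omega
  have hfill : ((PySem.List.pyRange (c + 1) (h - 1) 1).foldl (fun d j => d.insert j []) dA).items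
      = dA.items ++ (PySem.List.pyRange (c + 1) (h - 1) 1).map (fun j => (j, ([] : List (List (String × Int))))) := by
    exact PySem.Dict.items_foldl_insert_fresh _ (fun j => j) (fun _ => []) dA hfresh
      (by simpa using PySem.List.nodup_pyRange_one (c + 1) (h - 1))
  have hcont2 : ((PySem.List.pyRange (c + 1) (h - 1) 1).foldl (fun d j => d.insert j []) dA).contains (h - 1) = false := by
    rw [PySem.Dict.contains_eq_decide_mem_keys]
    have hkeys2 : ((PySem.List.pyRange (c + 1) (h - 1) 1).foldl (fun d j => d.insert j []) dA).keys
        = ((PySem.List.pyRange (c + 1) (h - 1) 1).foldl (fun d j => d.insert j []) dA).items.map (·.1) := rfl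
    rw [hkeys2, hfill]
    simp only [List.map_append, List.map_map, List.mem_append]
    simp only [hI3, List.map_map]
    simp only [decide_eq_false_iff_not, List.mem_map, PySem.List.mem_pyRange_one, Function.comp]
    rintro (⟨k, hk, rfl⟩ | ⟨k, hk, rfl⟩) <;> omega
  have hgetD0 : ((PySem.List.pyRange (c + 1) (h - 1) 1).foldl (fun d j => d.insert j []) dA).getD (h - 1) [] = [] :=
    PySem.Dict.getD_of_not_contains _ _ hcont2
  have hmod : (((PySem.List.pyRange (c + 1) (h - 1) 1).foldl (fun d j => d.insert j []) dA).modify (h - 1) [] (· ++ [tw]))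
      = ((PySem.List.pyRange (c + 1) (h - 1) 1).foldl (fun d j => d.insert j []) dA).insert (h - 1) ([] ++ [tw]) := by
    rw [show (((PySem.List.pyRange (c + 1) (h - 1) 1).foldl (fun d j => d.insert j []) dA).modify (h - 1) [] (· ++ [tw]))
          = ((PySem.List.pyRange (c + 1) (h - 1) 1).foldl (fun d j => d.insert j []) dA).insert (h - 1)
              (((PySem.List.pyRange (c + 1) (h - 1) 1).foldl (fun d j => d.insert j []) dA).getD (h - 1) [] ++ [tw]) from rfl,
        hgetD0]
  rw [hmod, PySem.Dict.items_insert_of_not_contains _ _ hcont2, hfill]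
  rw [PySem.List.pyRange_one_succ_right (by omega : (0:Int) ≤ h - 1),
      PySem.List.pyRange_one_append 0 (c + 1) (h - 1) (by omega) (by omega)]
  simp only [List.map_append, List.append_assoc, List.map_cons, List.map_nil]
  congr 1
  · rw [hI3]
    refine List.map_congr_left fun k hk => ?_
    have hk' := PySem.List.mem_pyRange_one.mp hk
    rw [PySem.Dict.getD_modify]
    rw [if_neg (by omega)]
  congr 1
  · refine List.map_congr_left fun k hk => ?_
    have hk' := PySem.List.mem_pyRange_one.mp hk
    rw [PySem.Dict.getD_modify, if_neg (by omega), hI5 k (by omega)]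
  · rw [PySem.Dict.getD_modify, if_pos rfl, hI5 (h - 1) (by omega)]

lemma pv_lockstep (t0 : Int) (l : List (List (String × Int))) :
    ∀ (c mx : Int) (dA dB : PySem.Dict Int (List (List (String × Int)))),
    0 ≤ c →
    mx ≤ t0 + 3600 * (c + 1) →
    (c = 0 ∨ 3600 * c < mx - t0) →
    pvTrig t0 mx (l.map pvFp) = false →
    dA.items = (PySem.List.pyRange 0 (c + 1) 1).map (fun k => (k, dB.getD k [])) →
    (∀ k : Int, c < k → dB.getD k [] = []) →
    (0 ≤ (l.foldl (pvStepB t0) (c, dB)).1 ∧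
     (l.foldl pvStepA (c, t0 + 3600 * (c + 1), dA)).1 = (l.foldl (pvStepB t0) (c, dB)).1 ∧
     (l.foldl pvStepA (c, t0 + 3600 * (c + 1), dA)).2.1 = t0 + 3600 * ((l.foldl (pvStepB t0) (c, dB)).1 + 1) ∧
     (l.map pvFp).foldl max mx ≤ t0 + 3600 * ((l.foldl (pvStepB t0) (c, dB)).1 + 1) ∧
     ((l.foldl (pvStepB t0) (c, dB)).1 = 0 ∨ 3600 * (l.foldl (pvStepB t0) (c, dB)).1 < (l.map pvFp).foldl max mx - t0) ∧
     (l.foldl pvStepA (c, t0 + 3600 * (c + 1), dA)).2.2.items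
       = (PySem.List.pyRange 0 ((l.foldl (pvStepB t0) (c, dB)).1 + 1) 1).map
           (fun k => (k, (l.foldl (pvStepB t0) (c, dB)).2.getD k [])) ∧
     (∀ k : Int, (l.foldl (pvStepB t0) (c, dB)).1 < k → (l.foldl (pvStepB t0) (c, dB)).2.getD k [] = [])) := by
  induction l with
  | nil =>
    intro c mx dA dB hc hmx hlow htrig hI3 hI5
    exact ⟨hc, rfl, rfl, hmx, hlow, hI3, hI5⟩
  | cons tw rest ih =>
    intro c mx dA dB hc hmx hlow htrig hI3 hI5
    simp only [List.map_cons, pvTrig, Bool.or_eq_false_iff] at htrig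
    obtain ⟨htw, htrig⟩ := htrig
    have hbr := (PySem.Int.neg_floordiv_neg_eq_iff_of_pos
      (a := pvFp tw - t0) (b := 3600) (by norm_num)).mp rfl
    have hneg : t0 - pvFp tw = -(pvFp tw - t0) := by ring
    rw [← hneg] at hbr
    set h : Int := -(PySem.Int.floordiv (t0 - pvFp tw) 3600) with hh
    by_cases hgt : pvFp tw > t0 + 3600 * (c + 1)
    · -- trigger case
      have hnm : (pvFp tw - t0) % 3600 ≠ 0 := by
        intro hm
        obtain ⟨m, hm'⟩ := Int.dvd_of_emod_eq_zero hm
        have h1 : (7200:Int) ≤ pvFp tw - t0 := by omega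
        have h2 : mx ≤ pvFp tw - 3600 := by omega
        simp [hm, h1, h2] at htw
      have hsr : pvFp tw - t0 < 3600 * h := by
        have h2 := hbr.2
        omega
      have hge : c + 2 ≤ h := by
        have h2 := hbr.2
        omega
      have hgap : PySem.Int.floordiv (pvFp tw - (t0 + 3600 * (c + 1))) 3600 = h - 2 - c := by
        refine (PySem.Int.floordiv_eq_iff_of_pos (by norm_num)).mpr ⟨?_, ?_⟩
        · have h1 := hbr.1
          omega
        · omega
      have hA := pv_stepA_trig c (t0 + 3600 * (c + 1)) dA tw hgt (h - 2 - c) hgap (by omega)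
      have hBgt : h - 1 > c := by omega
      have hB : pvStepB t0 (c, dB) tw = (h - 1, dB.modify (h - 1) [] (· ++ [tw])) := by
        rw [pv_stepB_eval, ← hh, if_pos hBgt]
      simp only [List.foldl_cons, hA, hB]
      rw [show c + (h - 2 - c) + 1 = h - 1 from by ring,
          show t0 + 3600 * (c + 1) + ((h - 2 - c) + 1) * 3600 = t0 + 3600 * ((h - 1) + 1) from by ring]
      refine ih (h - 1) (max mx (pvFp tw)) _ _ (by omega) (max_le (by omega) (by omega))
        (Or.inr (by have h1 := hbr.1; have := le_max_right mx (pvFp tw); omega)) htrig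
        (pv_trig_items c h dA dB tw hc hge hI3 hI5) ?_
      intro k hk
      rw [PySem.Dict.getD_modify, if_neg (by omega)]
      exact hI5 k (by omega)
    · -- no-trigger case
      have hA := pv_stepA_no c (t0 + 3600 * (c + 1)) dA tw hgt
      have hBle : ¬ (h - 1 > c) := by
        have h1 := hbr.1
        omega
      have hB : pvStepB t0 (c, dB) tw = (c, dB.modify c [] (· ++ [tw])) := by
        rw [pv_stepB_eval, ← hh, if_neg hBle]
      simp only [List.foldl_cons, hA, hB]
      refine ih c (max mx (pvFp tw)) _ _ hc (max_le hmx (by omega))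
        (by rcases hlow with h0 | h0
            · exact Or.inl h0
            · exact Or.inr (by have := le_max_left mx (pvFp tw); omega)) htrig ?_ ?_
      · rw [pv_modify_items c dA (fun k => dB.getD k []) tw hc hI3]
        refine List.map_congr_left fun k hk => ?_
        rw [PySem.Dict.getD_modify]
      · intro k hk
        rw [PySem.Dict.getD_modify, if_neg (by omega)]
        exact hI5 k hk

lemma pv_fill_keys (iA g : Int) (dA : PySem.Dict Int (List (List (String × Int))))
    (_hg : 0 ≤ g) (_hiA : 0 ≤ iA)
    (hkeys : dA.keys = PySem.List.pyRange 0 (iA + 1) 1) :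
    ((PySem.List.pyRange (iA + 1) (iA + g + 1) 1).foldl (fun d j => d.insert j []) dA).items
      = dA.items ++ (PySem.List.pyRange (iA + 1) (iA + g + 1) 1).map (fun j => (j, ([] : List (List (String × Int))))) := by
  have hfresh : ∀ j ∈ PySem.List.pyRange (iA + 1) (iA + g + 1) 1, dA.contains j = false := by
    intro j hj
    have hj' := PySem.List.mem_pyRange_one.mp hj
    rw [PySem.Dict.contains_eq_decide_mem_keys, hkeys]
    simp only [PySem.List.mem_pyRange_one, decide_eq_false_iff_not]
    omega
  exact PySem.Dict.items_foldl_insert_fresh _ (fun j => j) (fun _ => []) dA hfresh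
    (by simpa using PySem.List.nodup_pyRange_one (iA + 1) (iA + g + 1))

lemma pv_stepA_trig_post (iA g m : Int) (dA : PySem.Dict Int (List (List (String × Int))))
    (tw : List (String × Int)) (hg : 0 ≤ g) (hm0 : 0 ≤ m) (hm : m + 1 ≤ iA) (hiA : 0 ≤ iA)
    (hkeys : dA.keys = PySem.List.pyRange 0 (iA + 1) 1) (hgm : dA.getD m [] = []) :
    ((((PySem.List.pyRange (iA + 1) (iA + g + 1) 1).foldl (fun d j => d.insert j []) dA).modify (iA + g + 1) [] (· ++ [tw])).keys
        = PySem.List.pyRange 0 ((iA + g + 1) + 1) 1) ∧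
    (((PySem.List.pyRange (iA + 1) (iA + g + 1) 1).foldl (fun d j => d.insert j []) dA).modify (iA + g + 1) [] (· ++ [tw])).getD m [] = [] := by
  have hfill := pv_fill_keys iA g dA hg hiA hkeys
  have hkeysfill : ((PySem.List.pyRange (iA + 1) (iA + g + 1) 1).foldl (fun d j => d.insert j []) dA).keys
      = PySem.List.pyRange 0 (iA + 1) 1 ++ PySem.List.pyRange (iA + 1) (iA + g + 1) 1 := by
    show (((PySem.List.pyRange (iA + 1) (iA + g + 1) 1).foldl (fun d j => d.insert j []) dA).items).map (·.1) = _
    rw [hfill, List.map_append, List.map_map]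
    rw [show dA.items.map (·.1) = dA.keys from rfl, hkeys]
    congr 1
    exact List.map_id _
  have hnodupfill : ((PySem.List.pyRange (iA + 1) (iA + g + 1) 1).foldl (fun d j => d.insert j []) dA).keys.Nodup := by
    rw [hkeysfill, ← PySem.List.pyRange_one_append 0 (iA + 1) (iA + g + 1) (by omega) (by omega)]
    exact PySem.List.nodup_pyRange_one 0 (iA + g + 1)
  have hcont : ((PySem.List.pyRange (iA + 1) (iA + g + 1) 1).foldl (fun d j => d.insert j []) dA).contains (iA + g + 1) = false := by
    rw [PySem.Dict.contains_eq_decide_mem_keys, hkeysfill]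
    simp only [List.mem_append, PySem.List.mem_pyRange_one, decide_eq_false_iff_not]
    omega
  have hgetD0 : ((PySem.List.pyRange (iA + 1) (iA + g + 1) 1).foldl (fun d j => d.insert j []) dA).getD (iA + g + 1) [] = [] :=
    PySem.Dict.getD_of_not_contains _ _ hcont
  have hmod : (((PySem.List.pyRange (iA + 1) (iA + g + 1) 1).foldl (fun d j => d.insert j []) dA).modify (iA + g + 1) [] (· ++ [tw]))
      = ((PySem.List.pyRange (iA + 1) (iA + g + 1) 1).foldl (fun d j => d.insert j []) dA).insert (iA + g + 1)
          (((PySem.List.pyRange (iA + 1) (iA + g + 1) 1).foldl (fun d j => d.insert j []) dA).getD (iA + g + 1) [] ++ [tw]) := rfl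
  constructor
  · rw [hmod, PySem.Dict.keys_insert_of_not_contains _ _ hcont, hkeysfill]
    rw [← PySem.List.pyRange_one_append 0 (iA + 1) (iA + g + 1) (by omega) (by omega),
        ← PySem.List.pyRange_one_succ_right (by omega : (0:Int) ≤ iA + g + 1)]
  · rw [hmod, PySem.Dict.getD_insert, if_neg (by omega)]
    -- getD over the fill fold at m is unchanged
    have hmemk : m ∈ dA.keys := by rw [hkeys]; exact PySem.List.mem_pyRange_one.mpr ⟨hm0, by omega⟩
    have hcm : dA.contains m = true := (PySem.Dict.contains_iff_mem_keys dA m).mpr hmemk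
    have hsome : dA.get? m = some [] := by
      have hiss : (dA.get? m).isSome := by rw [← PySem.Dict.contains_eq_isSome_get?, hcm]
      obtain ⟨v, hv⟩ := Option.isSome_iff_exists.mp hiss
      have := PySem.Dict.getD_eq_get?_getD dA m []
      rw [hv] at this ⊢
      simp only [Option.getD_some] at this
      rw [hgm] at this
      rw [← this]
    have hmemi : (m, ([] : List (List (String × Int)))) ∈ dA.items :=
      PySem.Dict.mem_items_of_get?_eq_some _ hsome
    refine PySem.Dict.getD_of_mem_items _ ?_ hnodupfill []
    rw [hfill]
    exact List.mem_append_left _ hmemi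

lemma pv_post (t0 m : Int) (suf : List (List (String × Int))) :
    ∀ (iA e : Int) (dA : PySem.Dict Int (List (List (String × Int)))) (curB : Int)
      (dB : PySem.Dict Int (List (List (String × Int)))),
    0 ≤ m → m + 1 ≤ iA → m ≤ curB →
    dA.keys = PySem.List.pyRange 0 (iA + 1) 1 →
    dA.getD m [] = [] →
    dB.getD m [] ≠ [] →
    (m + 1 ≤ (suf.foldl pvStepA (iA, e, dA)).1 ∧
     (suf.foldl pvStepA (iA, e, dA)).2.2.keys = PySem.List.pyRange 0 ((suf.foldl pvStepA (iA, e, dA)).1 + 1) 1 ∧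
     (suf.foldl pvStepA (iA, e, dA)).2.2.getD m [] = [] ∧
     m ≤ (suf.foldl (pvStepB t0) (curB, dB)).1 ∧
     (suf.foldl (pvStepB t0) (curB, dB)).2.getD m [] ≠ []) := by
  induction suf with
  | nil =>
    intro iA e dA curB dB hm0 hmA hmB hkeys hgA hgB
    exact ⟨hmA, hkeys, hgA, hmB, hgB⟩
  | cons tw suf ih =>
    intro iA e dA curB dB hm0 hmA hmB hkeys hgA hgB
    -- B step
    have hB := pv_stepB_eval t0 curB dB tw
    set cur' : Int := if -(PySem.Int.floordiv (t0 - pvFp tw) 3600) - 1 > curB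
        then -(PySem.Int.floordiv (t0 - pvFp tw) 3600) - 1 else curB with hcur'
    have hcurB : curB ≤ cur' := by rw [hcur']; split <;> omega
    have hgB' : (dB.modify cur' [] (· ++ [tw])).getD m [] ≠ [] := by
      rw [PySem.Dict.getD_modify]
      split
      · simp
      · exact hgB
    -- A step
    by_cases hgt : pvFp tw > e
    · have hg0 : 0 ≤ PySem.Int.floordiv (pvFp tw - e) 3600 := by
        rw [PySem.Int.floordiv_eq_ediv_of_pos (by norm_num)]
        exact Int.ediv_nonneg (by omega) (by norm_num)
      have hA := pv_stepA_trig iA e dA tw hgt (PySem.Int.floordiv (pvFp tw - e) 3600) rfl hg0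
      set g : Int := PySem.Int.floordiv (pvFp tw - e) 3600 with hgdef
      have hpost := pv_stepA_trig_post iA g m dA tw hg0 hm0 hmA (by omega) hkeys hgA
      simp only [List.foldl_cons, hA, hB]
      exact ih (iA + g + 1) (e + (g + 1) * 3600) _ cur' _ hm0 (by omega) (by omega) hpost.1 hpost.2 hgB'
    · have hA := pv_stepA_no iA e dA tw hgt
      simp only [List.foldl_cons, hA, hB]
      have hcontA : dA.contains iA = true := by
        rw [PySem.Dict.contains_eq_decide_mem_keys, hkeys]
        simp only [PySem.List.mem_pyRange_one, decide_eq_true_eq]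
        omega
      have hkeys' : (dA.modify iA [] (· ++ [tw])).keys = PySem.List.pyRange 0 (iA + 1) 1 := by
        rw [show dA.modify iA [] (· ++ [tw]) = dA.insert iA (dA.getD iA [] ++ [tw]) from rfl,
            PySem.Dict.keys_insert_of_contains _ _ hcontA, hkeys]
      have hgA' : (dA.modify iA [] (· ++ [tw])).getD m [] = [] := by
        rw [PySem.Dict.getD_modify, if_neg (by omega)]
        exact hgA
      exact ih iA e _ cur' _ hm0 hmA (by omega) hkeys' hgA' hgB'

lemma pv_items_rep (d : PySem.Dict Int (List (List (String × Int)))) (hnd : d.keys.Nodup) :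
    d.items = d.keys.map (fun k => (k, d.getD k [])) := by
  conv_lhs => rw [← List.map_id d.items]
  rw [show d.keys = d.items.map (·.1) from rfl, List.map_map]
  refine List.map_congr_left fun p hp => ?_
  have hv : d.getD p.1 [] = p.2 := PySem.Dict.getD_of_mem_items d (by simpa using hp) hnd []
  simp only [id, Function.comp_apply, hv]

lemma pv_div_step (t0 C h : Int) (DA DB : PySem.Dict Int (List (List (String × Int))))
    (w : List (String × Int))
    (hC : 0 ≤ C) (hh : C + 2 ≤ h) (ht : pvFp w - t0 = 3600 * h)
    (hI3 : DA.items = (PySem.List.pyRange 0 (C + 1) 1).map (fun k => (k, DB.getD k [])))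
    (hI5 : ∀ k : Int, C < k → DB.getD k [] = []) :
    ((pvStepA (C, t0 + 3600 * (C + 1), DA) w).1 = h ∧
     (pvStepA (C, t0 + 3600 * (C + 1), DA) w).2.2.keys = PySem.List.pyRange 0 (h + 1) 1 ∧
     (pvStepA (C, t0 + 3600 * (C + 1), DA) w).2.2.getD (h - 1) [] = [] ∧
     (pvStepB t0 (C, DB) w).1 = h - 1 ∧
     (pvStepB t0 (C, DB) w).2.getD (h - 1) [] ≠ []) := by
  have hgt : pvFp w > t0 + 3600 * (C + 1) := by omega
  have hgap : PySem.Int.floordiv (pvFp w - (t0 + 3600 * (C + 1))) 3600 = h - C - 1 := by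
    refine (PySem.Int.floordiv_eq_iff_of_pos (by norm_num)).mpr ⟨by omega, by omega⟩
  have hA := pv_stepA_trig C (t0 + 3600 * (C + 1)) DA w hgt (h - C - 1) hgap (by omega)
  have hkeys : DA.keys = PySem.List.pyRange 0 (C + 1) 1 := pv_keys_eq C DA _ hI3
  have hfill := pv_fill_keys C (h - C - 1) DA (by omega) hC hkeys
  rw [show C + (h - C - 1) + 1 = h from by ring] at hA hfill
  have hkeysfill : ((PySem.List.pyRange (C + 1) h 1).foldl (fun d j => d.insert j []) DA).keys
      = PySem.List.pyRange 0 (C + 1) 1 ++ PySem.List.pyRange (C + 1) h 1 := by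
    show (((PySem.List.pyRange (C + 1) h 1).foldl (fun d j => d.insert j []) DA).items).map (·.1) = _
    rw [hfill, List.map_append, List.map_map, show DA.items.map (·.1) = DA.keys from rfl, hkeys]
    congr 1
    exact List.map_id _
  have hnodupfill : ((PySem.List.pyRange (C + 1) h 1).foldl (fun d j => d.insert j []) DA).keys.Nodup := by
    rw [hkeysfill, ← PySem.List.pyRange_one_append 0 (C + 1) h (by omega) (by omega)]
    exact PySem.List.nodup_pyRange_one 0 h
  have hcont : ((PySem.List.pyRange (C + 1) h 1).foldl (fun d j => d.insert j []) DA).contains h = false := by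
    rw [PySem.Dict.contains_eq_decide_mem_keys, hkeysfill]
    simp only [List.mem_append, PySem.List.mem_pyRange_one, decide_eq_false_iff_not]
    omega
  have hmod : (((PySem.List.pyRange (C + 1) h 1).foldl (fun d j => d.insert j []) DA).modify h [] (· ++ [w]))
      = ((PySem.List.pyRange (C + 1) h 1).foldl (fun d j => d.insert j []) DA).insert h
          (((PySem.List.pyRange (C + 1) h 1).foldl (fun d j => d.insert j []) DA).getD h [] ++ [w]) := rfl
  have hB : pvStepB t0 (C, DB) w = (h - 1, DB.modify (h - 1) [] (· ++ [w])) := by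
    have hz : -(PySem.Int.floordiv (t0 - pvFp w) 3600) = h := by
      have hneg : t0 - pvFp w = -(pvFp w - t0) := by ring
      rw [hneg]
      exact (PySem.Int.neg_floordiv_neg_eq_iff_of_pos (by norm_num)).mpr ⟨by omega, by omega⟩
    rw [pv_stepB_eval, hz, if_pos (by omega)]
  refine ⟨by rw [hA], ?_, ?_, by rw [hB], ?_⟩
  · rw [hA, hmod]
    show (PySem.Dict.insert _ _ _).keys = _
    rw [PySem.Dict.keys_insert_of_not_contains _ _ hcont, hkeysfill,
        ← PySem.List.pyRange_one_append 0 (C + 1) h (by omega) (by omega),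
        ← PySem.List.pyRange_one_succ_right (by omega : (0:Int) ≤ h)]
  · rw [hA, hmod]
    show (PySem.Dict.insert _ _ _).getD (h - 1) [] = []
    rw [PySem.Dict.getD_insert, if_neg (by omega)]
    refine PySem.Dict.getD_of_mem_items _ ?_ hnodupfill []
    rw [hfill]
    refine List.mem_append_right _ ?_
    exact List.mem_map.mpr ⟨h - 1, PySem.List.mem_pyRange_one.mpr ⟨by omega, by omega⟩, rfl⟩
  · rw [hB]
    show (DB.modify (h - 1) [] (· ++ [w])).getD (h - 1) [] ≠ []
    rw [PySem.Dict.getD_modify, if_pos rfl, hI5 (h - 1) (by omega)]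
    simp

lemma pv_neq (first : List (String × Int)) (rest : List (List (String × Int)))
    (hd : D_define_dic (first :: rest)) :
    define_dic (first :: rest) ≠ define_dic_alt (first :: rest) := by
  simp only [D_define_dic] at hd
  have hex : ∃ i, i < ((first :: rest).map pvFp).length ∧
      (3600 ∣ (((first :: rest).map pvFp).getD i 0 - ((first :: rest).map pvFp).getD 0 0) ∧
       7200 ≤ ((first :: rest).map pvFp).getD i 0 - ((first :: rest).map pvFp).getD 0 0 ∧
       ∀ x ∈ ((first :: rest).map pvFp).take i, x ≤ ((first :: rest).map pvFp).getD i 0 - 3600) := by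
    obtain ⟨i, hi, hb⟩ := hd
    exact ⟨i, hi, hb⟩
  classical
  have hi0len := (Nat.find_spec hex).1
  have hlen : ((first :: rest).map pvFp).length = rest.length + 1 := by simp
  have hi0pos : 1 ≤ Nat.find hex := by
    rcases Nat.eq_zero_or_pos (Nat.find hex) with h0 | h0
    · exfalso
      have h720 := (Nat.find_spec hex).2.2.1
      rw [h0] at h720
      omega
    · exact h0
  have hjlen : Nat.find hex - 1 < rest.length := by omega
  set j : Nat := Nat.find hex - 1 with hjdef
  have hij : Nat.find hex = j + 1 := by omega
  set w : List (String × Int) := rest[j]'hjlen with hw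
  set t0 : Int := pvFp first with ht0
  set pre : List (List (String × Int)) := rest.take j with hpre
  set suf : List (List (String × Int)) := rest.drop (j + 1) with hsuf
  have hrest : rest = pre ++ w :: suf := by
    rw [hpre, hw, hsuf, List.getElem_cons_drop hjlen, List.take_append_drop]
  have hpremap : pre.map pvFp = (rest.map pvFp).take j := by
    rw [hpre, List.map_take]
  have hprelen : (pre.map pvFp).length = j := by
    simp [hpre]
    omega
  have htsj : ((first :: rest).map pvFp).getD (Nat.find hex) 0 = pvFp w := by
    have h1 : ((first :: rest).map pvFp).getD (Nat.find hex) 0 = (rest.map pvFp).getD j 0 := by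
      rw [hij]
      rfl
    rw [h1, List.getD_eq_getElem _ 0 (by simpa using hjlen), List.getElem_map]
  have hdvdw : (3600:Int) ∣ pvFp w - t0 := by
    have h2 := (Nat.find_spec hex).2.1
    rw [htsj] at h2
    exact h2
  have h72w : (7200:Int) ≤ pvFp w - t0 := by
    have h2 := (Nat.find_spec hex).2.2.1
    rw [htsj] at h2
    exact h2
  have hallw : ∀ x ∈ ((first :: rest).map pvFp).take (j + 1), x ≤ pvFp w - 3600 := by
    have h2 := (Nat.find_spec hex).2.2.2
    rw [htsj, hij] at h2
    exact h2
  obtain ⟨m, hmq⟩ := hdvdw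
  -- the prefix of the scan is trigger-free (else an earlier index would satisfy the condition)
  have htrigpre : pvTrig t0 t0 (pre.map pvFp) = false := by
    by_contra htr
    rw [Bool.not_eq_false] at htr
    obtain ⟨i', hi', hdvd', h72', hmx', hall'⟩ := pvTrig_true_exists t0 (pre.map pvFp) t0 htr
    have hi'j : i' < j := by omega
    have hvv : ((first :: rest).map pvFp).getD (i' + 1) 0 = (pre.map pvFp).getD i' 0 := by
      have h1 : ((first :: rest).map pvFp).getD (i' + 1) 0 = (rest.map pvFp).getD i' 0 := rfl
      rw [h1, hpremap]
      rw [List.getD_eq_getElem _ 0 (by simp; omega), List.getD_eq_getElem _ 0 (by simp; omega)]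
      exact (List.getElem_take).symm
    refine absurd ?_ (Nat.find_min hex (show i' + 1 < Nat.find hex from by omega))
    refine ⟨by rw [hlen]; omega, ?_, ?_, ?_⟩
    · rw [hvv]; exact hdvd'
    · rw [hvv]; exact h72'
    · intro x hx
      rw [hvv]
      rw [List.map_cons, List.take_succ_cons] at hx
      rcases List.mem_cons.mp hx with rfl | hx
      · omega
      · refine hall' x ?_
        rw [hpremap, List.take_take, min_eq_left (by omega)]
        exact hx
  -- initial state after the first tweet
  have h1A : pvStepA (0, t0 + 3600, PySem.Dict.empty) first
      = (0, t0 + 3600, PySem.Dict.empty.modify 0 [] (· ++ [first])) :=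
    pv_stepA_no 0 (t0 + 3600) PySem.Dict.empty first (by rw [← ht0]; omega)
  have hz : PySem.Int.floordiv (t0 - pvFp first) 3600 = 0 := by
    rw [← ht0]
    refine (PySem.Int.floordiv_eq_iff_of_pos (by norm_num)).mpr ⟨by omega, by omega⟩
  have h1B : pvStepB t0 (0, PySem.Dict.empty) first
      = (0, PySem.Dict.empty.modify 0 [] (· ++ [first])) := by
    rw [pv_stepB_eval, hz]
    norm_num
  set d1 : PySem.Dict Int (List (List (String × Int))) := PySem.Dict.empty.modify 0 [] (· ++ [first]) with hd1
  have hI31 : d1.items = (PySem.List.pyRange 0 (0 + 1) 1).map (fun k => (k, d1.getD k [])) := by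
    have h1 : d1.items = [(0, [first])] := rfl
    have hr : PySem.List.pyRange 0 (0 + 1) 1 = [0] := rfl
    rw [h1, hr]
    simp only [List.map_cons, List.map_nil]
    rw [hd1, PySem.Dict.getD_modify, if_pos rfl]
    rfl
  have hI51 : ∀ k : Int, 0 < k → d1.getD k [] = [] := by
    intro k hk
    rw [hd1, PySem.Dict.getD_modify, if_neg (by omega)]
    rfl
  obtain ⟨hC0, hieq, hend, hmxle, hlow, hI3F, hI5F⟩ :=
    pv_lockstep t0 pre 0 t0 d1 d1 (by omega) (by omega) (Or.inl rfl) htrigpre hI31 hI51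
  set fA := pre.foldl pvStepA (0, t0 + 3600 * (0 + 1), d1) with hfA
  set fB := pre.foldl (pvStepB t0) (0, d1) with hfB
  set C : Int := fB.1 with hC
  set DA := fA.2.2 with hDA
  set DB := fB.2 with hDB
  have hfAeq : fA = (C, t0 + 3600 * (C + 1), DA) := by
    rw [show (C, t0 + 3600 * (C + 1), DA) = (fA.1, fA.2.1, fA.2.2) from by rw [hieq, hend]]
  -- the running max of the processed times is at most pvFp w - 3600
  have hmxb : (pre.map pvFp).foldl max t0 ≤ pvFp w - 3600 := by
    rcases PySem.List.foldl_max_mem (pre.map pvFp) t0 with hmm | hmm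
    · rw [hmm]; omega
    · refine hallw _ ?_
      rw [List.map_cons, List.take_succ_cons]
      refine List.mem_cons_of_mem _ ?_
      rw [← hpremap]
      exact hmm
  have hC2 : C + 2 ≤ m := by
    rcases hlow with h0 | h0
    · omega
    · omega
  -- divergence step at w
  obtain ⟨hS1, hSkeys, hSgD, hSB1, hSBgD⟩ :=
    pv_div_step t0 C m DA DB w hC0 hC2 (by omega) hI3F hI5F
  set S := pvStepA (C, t0 + 3600 * (C + 1), DA) w with hS
  set SB := pvStepB t0 (C, DB) w with hSB
  -- post-divergence: the marker bucket m - 1 stays empty in A and nonempty in B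
  obtain ⟨hfin1, hfinkeys, hfingD, hfinB1, hfinBgD⟩ :=
    pv_post t0 (m - 1) suf S.1 S.2.1 S.2.2 SB.1 SB.2 (by omega) (by omega) (by omega)
      (by rw [hS1]; exact hSkeys)
      (by rw [show m - 1 = m - 1 from rfl]; rw [show (m:Int) - 1 = m - 1 from rfl]; exact hSgD)
      hSBgD
  -- unfold both programs to the final fold states
  intro heq
  have hAout : define_dic (first :: rest)
      = (suf.foldl pvStepA (S.1, S.2.1, S.2.2)).2.2.items := by
    show ((first :: rest).foldl pvStepA (0, pvFp first + 3600, PySem.Dict.empty)).2.2.items = _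
    rw [List.foldl_cons, ← ht0, h1A, hrest, List.foldl_append, List.foldl_cons]
    rw [show t0 + 3600 = t0 + 3600 * (0 + 1) from by ring, ← hfA, hfAeq, ← hS]
  have hBout : define_dic_alt (first :: rest)
      = (PySem.List.pyRange 0 ((suf.foldl (pvStepB t0) (SB.1, SB.2)).1 + 1) 1).map
          (fun k => (k, (suf.foldl (pvStepB t0) (SB.1, SB.2)).2.getD k [])) := by
    show (PySem.List.pyRange 0 (((first :: rest).foldl (pvStepB (pvFp first)) (0, PySem.Dict.empty)).1 + 1) 1).map
          (fun k => (k, ((first :: rest).foldl (pvStepB (pvFp first)) (0, PySem.Dict.empty)).2.getD k [])) = _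
    rw [List.foldl_cons, ← ht0, h1B, hrest, List.foldl_append, List.foldl_cons, ← hfB, ← hSB]
  rw [hAout, hBout] at heq
  -- the marker entry (m - 1, []) is in A's output but cannot be in B's
  have hnodupF : (suf.foldl pvStepA (S.1, S.2.1, S.2.2)).2.2.keys.Nodup := by
    rw [hfinkeys]
    exact PySem.List.nodup_pyRange_one _ _
  have hmem : ((m:Int) - 1, ([] : List (List (String × Int)))) ∈ (suf.foldl pvStepA (S.1, S.2.1, S.2.2)).2.2.items := by
    rw [pv_items_rep _ hnodupF, hfinkeys]
    refine List.mem_map.mpr ⟨m - 1, PySem.List.mem_pyRange_one.mpr ⟨by omega, by omega⟩, ?_⟩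
    rw [hfingD]
  rw [heq] at hmem
  obtain ⟨k, hk, hkeq⟩ := List.mem_map.mp hmem
  have hk1 : k = m - 1 := (Prod.mk.injEq _ _ _ _).mp hkeq |>.1
  have hk2 : (suf.foldl (pvStepB t0) (SB.1, SB.2)).2.getD k [] = [] := (Prod.mk.injEq _ _ _ _).mp hkeq |>.2
  rw [hk1] at hk2
  exact hfinBgD hk2

theorem pv_main (tweets : List (List (String × Int))) (hne : tweets ≠ [])
    (hnd : ¬ D_define_dic tweets) : define_dic tweets = define_dic_alt tweets := by
  match tweets with
  | [] => exact absurd rfl hne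
  | first :: rest =>
    have htrig : pvTrig (pvFp first) (pvFp first) (rest.map pvFp) = false := by
      by_contra htr
      rw [Bool.not_eq_false] at htr
      obtain ⟨i, hi, hd, h72, hmx, hall⟩ := pvTrig_true_exists (pvFp first) (rest.map pvFp) (pvFp first) htr
      refine hnd ⟨i + 1, ?_, ?_, ?_, ?_⟩
      · simpa using Nat.succ_lt_succ hi
      · simpa using hd
      · simpa using h72
      · intro x hx
        simp only [List.map_cons, List.take_succ_cons, List.getD_cons_succ] at hx ⊢
        rcases List.mem_cons.mp hx with rfl | hx
        · omega
        · exact hall x hx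
    show ((first :: rest).foldl pvStepA (0, pvFp first + 3600, PySem.Dict.empty)).2.2.items
        = (PySem.List.pyRange 0 (((first :: rest).foldl (pvStepB (pvFp first)) (0, PySem.Dict.empty)).1 + 1) 1).map
            (fun k => (k, ((first :: rest).foldl (pvStepB (pvFp first)) (0, PySem.Dict.empty)).2.getD k []))
    have h1A : pvStepA (0, pvFp first + 3600, PySem.Dict.empty) first
        = (0, pvFp first + 3600, PySem.Dict.empty.modify 0 [] (· ++ [first])) :=
      pv_stepA_no 0 (pvFp first + 3600) PySem.Dict.empty first (by omega)
    have hz : PySem.Int.floordiv (pvFp first - pvFp first) 3600 = 0 := by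
      refine (PySem.Int.floordiv_eq_iff_of_pos (by norm_num)).mpr ⟨by omega, by omega⟩
    have h1B : pvStepB (pvFp first) (0, PySem.Dict.empty) first
        = (0, PySem.Dict.empty.modify 0 [] (· ++ [first])) := by
      rw [pv_stepB_eval, hz]
      norm_num
    simp only [List.foldl_cons, h1A, h1B]
    rw [show pvFp first + 3600 = pvFp first + 3600 * (0 + 1) from by ring]
    have hI3 : (PySem.Dict.empty.modify 0 [] (· ++ [first]) : PySem.Dict Int (List (List (String × Int)))).items
        = (PySem.List.pyRange 0 (0 + 1) 1).map
            (fun k => (k, (PySem.Dict.empty.modify 0 [] (· ++ [first]) : PySem.Dict Int (List (List (String × Int)))).getD k [])) := by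
      have h1 : (PySem.Dict.empty.modify 0 [] (· ++ [first]) : PySem.Dict Int (List (List (String × Int)))).items
          = [(0, [first])] := rfl
      have hr : PySem.List.pyRange 0 (0 + 1) 1 = [0] := rfl
      rw [h1, hr]
      simp only [List.map_cons, List.map_nil]
      rw [PySem.Dict.getD_modify, if_pos rfl]
      rfl
    have hI5 : ∀ k : Int, (0:Int) < k →
        (PySem.Dict.empty.modify 0 [] (· ++ [first]) : PySem.Dict Int (List (List (String × Int)))).getD k [] = [] := by
      intro k hk
      rw [PySem.Dict.getD_modify, if_neg (by omega)]
      rfl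
    exact (pv_lockstep (pvFp first) rest 0 (pvFp first) _ _ (by omega) (by omega)
      (Or.inl rfl) htrig hI3 hI5).2.2.2.2.2.1

-- ===== VERDICT (by name: the statement is the Claim_ definition above) =====
theorem define_dic_spec : Claim_unchanged_define_dic := by
  intro tweets _hdom hpre hnd
  exact pv_main tweets hpre.1 hnd

theorem define_dic_changed : Claim_changed_define_dic := by
  unfold Claim_changed_define_dic
  exact ⟨by decide, by decide, by decide, by decide, by decide, by decide⟩

theorem define_dic_tight : Claim_exact_define_dic := by
  intro tweets _hdom hpre hd
  match tweets with
  | [] => exact absurd rfl hpre.1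
  | first :: rest => exact pv_neq first rest hd
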